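-- pv_equiv track=rewrite | github.com/ikokkari/AI | Python/solutions.py | domino_pop
-- ===== SOURCE A (Python) =====
-- def domino_pop(dominoes):
--     def matches(pip1, pip2):
--         return pip1 == pip2 or pip1 == 0 or pip2 == 0
--
--     def backtrack(stack):
--         # Base case: no more dominoes to process
--         if not stack:
--             return 0
--
--         # If only one domino left, can't eliminate it
--         if len(stack) == 1:
--             return 1
--
--         best = len(stack)  # Worst case: keep all dominoes
--
--         # Try to find matching pairs
--         for i in range(len(stack) - 1):
--             # Check if dominoes at positions i and i+1 match
--             right_pip_i = stack[i][1]
--             left_pip_i_plus_1 = stack[i + 1][0]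
--
--             if matches(right_pip_i, left_pip_i_plus_1):
--                 # Remove this pair and recurse
--                 new_stack = stack[:i] + stack[i+2:]
--                 result = backtrack(new_stack)
--                 best = min(best, result)
--
--         return best
--
--     return backtrack(list(dominoes))
-- ===== SOURCE B (Python) =====
-- def domino_pop(dominoes):
--     def matches(p, q):
--         return p == q or p == 0 or q == 0
--
--     def removable(ds):
--         # can the whole block ds be eliminated?
--         if not ds:
--             return True
--         head, tail = ds[0], ds[1:]
--         return any(matches(head[1], tail[k][0])
--                    and removable(tail[:k]) and removable(tail[k + 1:])
--                    for k in range(len(tail)))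
--
--     def leftover(ds):
--         # minimum number of dominoes that must remain
--         if not ds:
--             return 0
--         head, tail = ds[0], ds[1:]
--         best = 1 + leftover(tail)  # the first domino survives
--         for k in range(len(tail)):  # or it is eliminated together with tail[k]
--             if matches(head[1], tail[k][0]) and removable(tail[:k]):
--                 best = min(best, leftover(tail[k + 1:]))
--         return best
--
--     return leftover(list(dominoes))
-- ===== Notes on version B (the rewrite author's own statement) =====
-- stated objective: faster
-- what changed: Instead of A's backtracking that branches on every adjacent matching pair of the whole stack at every level, B decides only the fate of the FIRST domino (survive, or be eliminated together with some later domino whose interior block is fully removable), using a separate interval-removability test; this shrinks the search tree drastically in practice.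
import Mathlib
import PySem

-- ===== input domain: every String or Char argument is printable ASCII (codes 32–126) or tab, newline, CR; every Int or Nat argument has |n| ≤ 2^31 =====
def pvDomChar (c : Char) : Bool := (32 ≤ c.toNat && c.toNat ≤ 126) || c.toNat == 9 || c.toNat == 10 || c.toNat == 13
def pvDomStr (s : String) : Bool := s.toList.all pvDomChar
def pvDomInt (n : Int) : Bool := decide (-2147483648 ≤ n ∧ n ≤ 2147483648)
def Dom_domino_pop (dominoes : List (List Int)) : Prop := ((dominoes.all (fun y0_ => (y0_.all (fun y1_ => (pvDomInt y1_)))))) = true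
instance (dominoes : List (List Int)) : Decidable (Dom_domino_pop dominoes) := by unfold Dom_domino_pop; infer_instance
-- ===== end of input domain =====

-- B replaces A's backtracking over every adjacent matching pair of the whole stack by a
-- head-only decomposition (first domino survives, or is eliminated with a later domino whose
-- interior block is fully removable); same return value, much smaller search tree in practice.

-- ===== PORT A =====
-- stack[i][j] for an in-range outer index i (Python raises on an out-of-range inner access;
-- Pre_domino_pop excludes exactly those inputs, so the .getD 0 default is never observed).
def pvPip (d : List Int) (j : Int) : Int := (PySem.List.pyGet? d j).getD 0

-- matches(pip1, pip2) — identical helper in Source A and Source B, shared by both ports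
def pvMatches (pip1 pip2 : Int) : Bool := pip1 == pip2 || pip1 == 0 || pip2 == 0

-- backtrack(stack); stack[:i] + stack[i+2:] = take i ++ drop (i+2) (exact: 0 ≤ i);
-- stack[i] = stack.getD i [] (exact: i < len(stack) from range)
def pvBacktrack (stack : List (List Int)) : Int :=
  if _h0 : stack = [] then 0
  else if _h1 : stack.length = 1 then 1
  else
    (List.range (stack.length - 1)).attach.foldl
      (fun best i =>
        if pvMatches (pvPip (stack.getD i.1 []) 1) (pvPip (stack.getD (i.1 + 1) []) 0)
        then min best (pvBacktrack (stack.take i.1 ++ stack.drop (i.1 + 2)))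
        else best)
      (stack.length : Int)
termination_by stack.length
decreasing_by
  have hi := i.2
  simp only [List.mem_range] at hi
  have h0 : stack.length ≠ 0 := by simpa [List.length_eq_zero_iff] using _h0
  simp only [List.length_append, List.length_take, List.length_drop]
  omega

def domino_pop (dominoes : List (List Int)) : Int := pvBacktrack dominoes

-- ===== PORT B =====
-- removable(ds): can the whole block be eliminated?  tail[:k] = take k, tail[k+1:] = drop (k+1)
def pvRemovable : List (List Int) → Bool
  | [] => true
  | head :: tail =>
    (List.range tail.length).any (fun k =>
      pvMatches (pvPip head 1) (pvPip (tail.getD k []) 0)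
      && pvRemovable (tail.take k)
      && pvRemovable (tail.drop (k + 1)))
termination_by ds => ds.length
decreasing_by
  · simp only [List.length_cons, List.length_take]; omega
  · simp only [List.length_cons, List.length_drop]; omega

-- leftover(ds): minimum number of dominoes that must remain
def pvLeftover : List (List Int) → Int
  | [] => 0
  | head :: tail =>
    (List.range tail.length).foldl
      (fun best k =>
        if pvMatches (pvPip head 1) (pvPip (tail.getD k []) 0) && pvRemovable (tail.take k)
        then min best (pvLeftover (tail.drop (k + 1)))
        else best)
      (1 + pvLeftover tail)
termination_by ds => ds.length
decreasing_by
  · simp only [List.length_cons, List.length_drop]; omega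
  · simp only [List.length_cons]; omega

def domino_pop_alt (dominoes : List (List Int)) : Int := pvLeftover dominoes

-- ===== PRECONDITION & SPEC =====
-- Exactly the inputs on which A returns: with at least two dominoes, A reads d[1] of every
-- domino except possibly the last and d[0] of the last, and raises IndexError otherwise;
-- with at most one domino it never indexes into a domino.
def Pre_domino_pop (dominoes : List (List Int)) : Prop :=
  dominoes.length ≤ 1 ∨
    ((∀ d ∈ dominoes.dropLast, 2 ≤ d.length) ∧ 1 ≤ ((dominoes.getLast?).getD [0]).length)
instance (dominoes : List (List Int)) : Decidable (Pre_domino_pop dominoes) := by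
  unfold Pre_domino_pop; infer_instance

def pvWitness_domino_pop : List (List Int) := [[1, 2], [2, 3]]

def Spec_domino_pop (dominoes : List (List Int)) (out : Int) : Prop := out = domino_pop_alt dominoes
instance (dominoes : List (List Int)) (out : Int) : Decidable (Spec_domino_pop dominoes out) := by unfold Spec_domino_pop; infer_instance

-- ===== CLAIM (what is proved, stated in full; the proofs are below) =====
def Claim_equal_domino_pop : Prop := ∀ (dominoes : List (List Int)), Dom_domino_pop dominoes → Pre_domino_pop dominoes → Spec_domino_pop dominoes (domino_pop dominoes)

-- ===== LEMMAS AND PROOFS =====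

-- abbreviations used only by the proofs
def pvM2 (d e : List Int) : Bool := pvMatches (pvPip d 1) (pvPip e 0)
def pvRm (s : List (List Int)) (i : Nat) : List (List Int) := s.take i ++ s.drop (i + 2)

theorem pvRm_length (s : List (List Int)) (i : Nat) (h : i + 2 ≤ s.length) :
    (pvRm s i).length = s.length - 2 := by
  simp only [pvRm, List.length_append, List.length_take, List.length_drop]; omega

-- closed forms of the two ports' equations, with attach removed and pvM2/pvRm folded in
theorem pvBacktrack_eq (s : List (List Int)) :
    pvBacktrack s =
      if s = [] then 0
      else if s.length = 1 then 1
      else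
        (List.range (s.length - 1)).foldl
          (fun best i =>
            if pvM2 (s.getD i []) (s.getD (i + 1) []) then min best (pvBacktrack (pvRm s i))
            else best)
          (s.length : Int) := by
  rw [pvBacktrack]
  split_ifs with h0 h1
  · rfl
  · rfl
  · conv_rhs => rw [← List.foldl_attach]
    simp only [pvM2, pvRm]

theorem pvLeftover_nil : pvLeftover [] = 0 := by rw [pvLeftover]

theorem pvLeftover_cons (a : List Int) (t : List (List Int)) :
    pvLeftover (a :: t) =
      (List.range t.length).foldl
        (fun best k =>
          if pvM2 a (t.getD k []) && pvRemovable (t.take k)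
          then min best (pvLeftover (t.drop (k + 1)))
          else best)
        (1 + pvLeftover t) := by
  rw [pvLeftover]; rfl

theorem pvRemovable_nil : pvRemovable ([] : List (List Int)) = true := by rw [pvRemovable]

theorem pvRemovable_cons_iff (a : List Int) (t : List (List Int)) :
    pvRemovable (a :: t) = true ↔
      ∃ k, k < t.length ∧ pvM2 a (t.getD k []) = true ∧
        pvRemovable (t.take k) = true ∧ pvRemovable (t.drop (k + 1)) = true := by
  rw [pvRemovable]
  simp [List.any_eq_true, List.mem_range, Bool.and_eq_true, pvM2, and_assoc]

-- generic facts about the min-accumulating folds both ports use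
theorem pvFold_le_init (p : Nat → Bool) (v : Nat → Int) :
    ∀ (l : List Nat) (init : Int),
      l.foldl (fun b i => if p i then min b (v i) else b) init ≤ init := by
  intro l
  induction l with
  | nil => intro init; exact le_refl _
  | cons j l ih =>
    intro init
    refine le_trans (ih _) ?_
    simp only []
    split
    · exact min_le_left _ _
    · exact le_refl _

theorem pvFold_le_mem (p : Nat → Bool) (v : Nat → Int) :
    ∀ (l : List Nat) (init : Int) (i : Nat), i ∈ l → p i = true →
      l.foldl (fun b i => if p i then min b (v i) else b) init ≤ v i := by
  intro l
  induction l with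
  | nil => intro _ i h; exact absurd h (List.not_mem_nil)
  | cons j l ih =>
    intro init i hmem hp
    rcases List.mem_cons.1 hmem with rfl | hmem
    · refine le_trans (pvFold_le_init p v l _) ?_
      simp only [hp, if_true]; exact min_le_right _ _
    · exact ih _ i hmem hp

theorem pvFold_ge (p : Nat → Bool) (v : Nat → Int) (X : Int) :
    ∀ (l : List Nat) (init : Int), X ≤ init → (∀ i ∈ l, p i = true → X ≤ v i) →
      X ≤ l.foldl (fun b i => if p i then min b (v i) else b) init := by
  intro l
  induction l with
  | nil => intro init h _; exact h
  | cons j l ih =>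
    intro init hinit hall
    refine ih _ ?_ (fun i hi hp => hall i (List.mem_cons_of_mem _ hi) hp)
    by_cases h : p j
    · simp only [h, if_true]
      exact le_min hinit (hall j List.mem_cons_self h)
    · simpa [h] using hinit

theorem pvB_nil : pvBacktrack [] = 0 := by rw [pvBacktrack_eq]; simp

theorem pvB_one (a : List Int) : pvBacktrack [a] = 1 := by rw [pvBacktrack_eq]; simp

theorem pvB_le_len (s : List (List Int)) : pvBacktrack s ≤ (s.length : Int) := by
  rw [pvBacktrack_eq]
  split_ifs with h0 h1
  · simp [h0]
  · simp [h1]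
  · exact pvFold_le_init _ _ _ _

theorem pvB_step (s : List (List Int)) (i : Nat) (hi : i + 1 < s.length)
    (hm : pvM2 (s.getD i []) (s.getD (i + 1) []) = true) :
    pvBacktrack s ≤ pvBacktrack (pvRm s i) := by
  rw [pvBacktrack_eq]
  rw [if_neg (by intro h; subst h; simp at hi), if_neg (by omega)]
  exact pvFold_le_mem _ _ _ _ i (List.mem_range.2 (by omega)) hm

theorem pvL_cons_le (a : List Int) (t : List (List Int)) :
    pvLeftover (a :: t) ≤ 1 + pvLeftover t := by
  rw [pvLeftover_cons]; exact pvFold_le_init _ _ _ _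

theorem pvL_le_len (s : List (List Int)) : pvLeftover s ≤ (s.length : Int) := by
  induction s with
  | nil => simp [pvLeftover_nil]
  | cons a t ih =>
    refine le_trans (pvL_cons_le a t) ?_
    simp only [List.length_cons]
    push_cast
    linarith

theorem pvM1 : ∀ (n : Nat) (s : List (List Int)) (a : List Int), s.length ≤ n →
    pvBacktrack (a :: s) ≤ 1 + pvBacktrack s := by
  intro n
  induction n with
  | zero =>
    intro s a h
    have hs : s = [] := List.length_eq_zero_iff.1 (by omega)
    subst hs
    simp [pvB_one, pvB_nil]
  | succ n ih =>
    intro s a hlen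
    by_cases hs0 : s = []
    · subst hs0; simp [pvB_one, pvB_nil]
    by_cases hs1 : s.length = 1
    · have h2 : pvBacktrack (a :: s) ≤ ((a :: s).length : Int) := pvB_le_len _
      rw [pvBacktrack_eq s, if_neg hs0, if_pos hs1]
      simp only [List.length_cons, hs1] at h2
      omega
    have h2 : 2 ≤ s.length := by
      have : s.length ≠ 0 := by simpa [List.length_eq_zero_iff] using hs0
      omega
    conv_rhs => rw [pvBacktrack_eq s, if_neg hs0, if_neg hs1]
    have hfold : pvBacktrack (a :: s) - 1 ≤
        (List.range (s.length - 1)).foldl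
          (fun best i =>
            if pvM2 (s.getD i []) (s.getD (i + 1) []) then min best (pvBacktrack (pvRm s i))
            else best)
          (s.length : Int) := by
      refine pvFold_ge _ _ _ _ _
        (by have := pvB_le_len (a :: s); simp only [List.length_cons] at this; push_cast at this ⊢; omega)
        ?_
      intro i hi hp
      show pvBacktrack (a :: s) - 1 ≤ pvBacktrack (pvRm s i)
      simp only [List.mem_range] at hi
      have hEq : pvRm (a :: s) (i + 1) = a :: pvRm s i := by
        simp [pvRm, List.take_succ_cons]
      have hstep : pvBacktrack (a :: s) ≤ pvBacktrack (a :: pvRm s i) := by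
        rw [← hEq]
        refine pvB_step _ _ (by simp only [List.length_cons]; omega) ?_
        simpa [List.getD_cons_succ] using hp
      have hlen' : (pvRm s i).length ≤ n := by
        rw [pvRm_length s i (by omega)]; omega
      have := ih (pvRm s i) a hlen'
      omega
    omega


-- index algebra for pvRm (Python's stack[:i] + stack[i+2:])
theorem pvRm_take_le (v : List (List Int)) (j k : Nat) (hk : k ≤ j) (hj : j + 2 ≤ v.length) :
    (pvRm v j).take k = v.take k := by
  simp [pvRm, List.take_append, List.length_take, List.take_take]
  rw [Nat.min_eq_left hk, Nat.min_eq_left (by omega), Nat.sub_eq_zero_of_le (by omega)]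
  simp

theorem pvRm_drop_ge (v : List (List Int)) (j k : Nat) (hj : j ≤ k) (hlen : j + 2 ≤ v.length) :
    (pvRm v j).drop (k + 1) = v.drop (k + 3) := by
  simp [pvRm, List.drop_append, List.length_take, List.drop_drop]
  rw [List.drop_eq_nil_of_le (by simp [List.length_take]; omega), Nat.min_eq_left (by omega)]
  simp
  congr 1
  omega

theorem pvRm_getD_lt (v : List (List Int)) (j k : Nat) (hk : k < j) (hj : j + 2 ≤ v.length) :
    (pvRm v j).getD k [] = v.getD k [] := by
  have h1 : k < (pvRm v j).length := by
    simp [pvRm, List.length_append, List.length_take, List.length_drop]; omega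
  rw [List.getD_eq_getElem _ _ h1, List.getD_eq_getElem _ _ (by omega)]
  show (v.take j ++ v.drop (j+2))[k]'_ = v[k]'_
  rw [List.getElem_append_left (by simp [List.length_take]; omega)]
  simp [List.getElem_take]

theorem pvRm_getD_ge (v : List (List Int)) (j k : Nat) (hj : j ≤ k) (hk : k + 2 < v.length) :
    (pvRm v j).getD k [] = v.getD (k + 2) [] := by
  have h1 : k < (pvRm v j).length := by
    simp [pvRm, List.length_append, List.length_take, List.length_drop]; omega
  rw [List.getD_eq_getElem _ _ h1, List.getD_eq_getElem _ _ (by omega)]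
  show (v.take j ++ v.drop (j+2))[k]'_ = v[k+2]'_
  rw [List.getElem_append_right (by simp [List.length_take]; omega)]
  have hl : (List.take j v).length = j := by simp; omega
  simp only [hl, List.getElem_drop]
  congr 1
  omega

theorem pvRm_take_ge (v : List (List Int)) (j k : Nat) (hj : j ≤ k) (hk : k + 2 ≤ v.length) :
    (pvRm v j).take k = pvRm (v.take (k + 2)) j := by
  simp only [pvRm, List.take_append, List.length_take, List.take_take, List.drop_take]
  rw [Nat.min_eq_right hj, Nat.min_eq_left (by omega), Nat.min_eq_left (by omega)]
  congr 2
  omega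

theorem pvRm_drop_lt (v : List (List Int)) (j k : Nat) (hk : k < j) (hj : j + 2 ≤ v.length) :
    (pvRm v j).drop (k + 1) = pvRm (v.drop (k + 1)) (j - (k + 1)) := by
  simp only [pvRm, List.drop_append, List.length_take, List.drop_take, List.drop_drop]
  rw [Nat.min_eq_left (by omega), show k + 1 - j = 0 from by omega,
      show j + 2 + 0 = k + 1 + (j - (k + 1) + 2) from by omega]

theorem pvGetD_drop (v : List (List Int)) (m i : Nat) (h : m + i < v.length) :
    (v.drop m).getD i [] = v.getD (m + i) [] := by
  rw [List.getD_eq_getElem _ _ (by simp [List.length_drop]; omega), List.getD_eq_getElem _ _ h]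
  exact List.getElem_drop ..

theorem pvGetD_take (v : List (List Int)) (n i : Nat) (hi : i < n) (hn : n ≤ v.length) :
    (v.take n).getD i [] = v.getD i [] := by
  rw [List.getD_eq_getElem _ _ (by simp [List.length_take]; omega), List.getD_eq_getElem _ _ (by omega)]
  exact List.getElem_take ..

theorem pvDecomp (t : List (List Int)) (k : Nat) (hk : k < t.length) :
    t = t.take k ++ t.getD k [] :: t.drop (k + 1) := by
  rw [List.getD_eq_getElem _ _ hk]
  conv_lhs => rw [← List.take_append_drop k t]
  rw [List.drop_eq_getElem_cons hk]

-- removing a fully removable block cannot increase A's answer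
theorem pvQ : ∀ (n : Nat) (u x y : List (List Int)), u.length ≤ n → pvRemovable u = true →
    pvBacktrack (x ++ u ++ y) ≤ pvBacktrack (x ++ y) := by
  intro n
  induction n with
  | zero =>
    intro u x y h _
    have hu : u = [] := List.length_eq_zero_iff.1 (by omega)
    subst hu; simp
  | succ n ih =>
    intro u x y hlen hr
    match u with
    | [] => simp
    | c :: v =>
      obtain ⟨k, hk, hm, hr1, hr2⟩ := (pvRemovable_cons_iff c v).1 hr
      simp only [List.length_cons] at hlen
      have s1 : pvBacktrack (x ++ (c :: v) ++ y) ≤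
          pvBacktrack ((x ++ [c]) ++ (v.getD k [] :: (v.drop (k + 1) ++ y))) := by
        have h := ih (v.take k) (x ++ [c]) (v.getD k [] :: (v.drop (k + 1) ++ y))
          (by simp [List.length_take]; omega) hr1
        have e : x ++ (c :: v) ++ y =
            (x ++ [c]) ++ v.take k ++ (v.getD k [] :: (v.drop (k + 1) ++ y)) := by
          conv_lhs => rw [pvDecomp v k hk]
          simp
        rw [e]
        exact h
      have s2 : pvBacktrack ((x ++ [c]) ++ (v.getD k [] :: (v.drop (k + 1) ++ y))) ≤
          pvBacktrack (x ++ (v.drop (k + 1) ++ y)) := by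
        have e : (x ++ [c]) ++ (v.getD k [] :: (v.drop (k + 1) ++ y)) =
            x ++ [c, v.getD k []] ++ (v.drop (k + 1) ++ y) := by simp
        rw [e]
        set g := v.getD k [] with hg
        set z := v.drop (k + 1) ++ y with hz
        have easc : x ++ [c, g] ++ z = (x ++ [c, g]) ++ z := by simp
        have hrm : pvRm (x ++ [c, g] ++ z) x.length = x ++ z := by
          unfold pvRm
          have ht : (x ++ [c, g] ++ z).take x.length = x := by
            rw [List.append_assoc]
            exact List.take_left' rfl
          have hd : (x ++ [c, g] ++ z).drop (x.length + 2) = z := by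
            rw [easc]
            exact List.drop_left' (by simp)
          rw [ht, hd]
        have hg1 : (x ++ [c, g] ++ z).getD x.length [] = c := by
          rw [List.append_assoc, List.getD_append_right x ([c, g] ++ z) [] x.length (le_refl _)]
          simp
        have hg2 : (x ++ [c, g] ++ z).getD (x.length + 1) [] = g := by
          rw [List.append_assoc, List.getD_append_right x ([c, g] ++ z) [] (x.length + 1) (by omega),
              show x.length + 1 - x.length = 1 from by omega]
          simp
        have hstep := pvB_step (x ++ [c, g] ++ z) x.length
          (by simp only [List.length_append, List.length_cons]; omega)
          (by rw [hg1, hg2]; exact hm)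
        rw [hrm] at hstep
        exact hstep
      have s3 : pvBacktrack (x ++ v.drop (k + 1) ++ y) ≤ pvBacktrack (x ++ y) :=
        ih (v.drop (k + 1)) x y (by simp [List.length_drop]; omega) hr2
      refine le_trans s1 (le_trans s2 ?_)
      simpa [List.append_assoc] using s3


-- inserting back an adjacent matching pair keeps a block fully removable
theorem pvRins : ∀ (n : Nat) (u : List (List Int)) (i : Nat), u.length ≤ n → i + 1 < u.length →
    pvM2 (u.getD i []) (u.getD (i + 1) []) = true → pvRemovable (pvRm u i) = true →
    pvRemovable u = true := by
  intro n
  induction n with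
  | zero => intro u i h hi _ _; omega
  | succ n ih =>
    intro u i hlen hi hm hrem
    match u with
    | [] => simp at hi
    | b :: v =>
      simp only [List.length_cons] at hlen hi
      match i with
      | 0 =>
        match v with
        | [] => simp at hi
        | c :: w =>
          have hrw : pvRm (b :: c :: w) 0 = w := by simp [pvRm]
          rw [hrw] at hrem
          refine (pvRemovable_cons_iff b (c :: w)).2 ⟨0, by simp, ?_, ?_, ?_⟩
          · simpa using hm
          · simp [pvRemovable_nil]
          · simpa using hrem
      | j + 1 =>
        have hj : j + 1 < v.length := by omega
        have hvlen : j + 2 ≤ v.length := by omega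
        have hmv : pvM2 (v.getD j []) (v.getD (j + 1) []) = true := by
          simpa [List.getD_cons_succ] using hm
        have hEq : pvRm (b :: v) (j + 1) = b :: pvRm v j := by
          simp [pvRm, List.take_succ_cons]
        rw [hEq] at hrem
        obtain ⟨k', hk', hm', hr1', hr2'⟩ := (pvRemovable_cons_iff b (pvRm v j)).1 hrem
        rw [pvRm_length v j hvlen] at hk'
        by_cases hcase : k' < j
        · refine (pvRemovable_cons_iff b v).2 ⟨k', by omega, ?_, ?_, ?_⟩
          · rwa [pvRm_getD_lt v j k' hcase hvlen] at hm'
          · rwa [pvRm_take_le v j k' (le_of_lt hcase) hvlen] at hr1'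
          · rw [pvRm_drop_lt v j k' hcase hvlen] at hr2'
            refine ih (v.drop (k' + 1)) (j - (k' + 1)) (by simp [List.length_drop]; omega)
              (by simp [List.length_drop]; omega) ?_ hr2'
            rw [pvGetD_drop v (k' + 1) (j - (k' + 1)) (by omega),
                pvGetD_drop v (k' + 1) (j - (k' + 1) + 1) (by omega),
                show k' + 1 + (j - (k' + 1)) = j from by omega,
                show k' + 1 + (j - (k' + 1) + 1) = j + 1 from by omega]
            exact hmv
        · rw [Nat.not_lt] at hcase
          refine (pvRemovable_cons_iff b v).2 ⟨k' + 2, by omega, ?_, ?_, ?_⟩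
          · rwa [pvRm_getD_ge v j k' hcase (by omega)] at hm'
          · rw [pvRm_take_ge v j k' hcase (by omega)] at hr1'
            refine ih (v.take (k' + 2)) j (by simp [List.length_take]; omega)
              (by simp [List.length_take]; omega) ?_ hr1'
            rw [pvGetD_take v (k' + 2) j (by omega) (by omega),
                pvGetD_take v (k' + 2) (j + 1) (by omega) (by omega)]
            exact hmv
          · rw [pvRm_drop_ge v j k' hcase hvlen] at hr2'
            rwa [show k' + 2 + 1 = k' + 3 from by omega]

-- removing an adjacent matching pair cannot increase B's answer
theorem pvLmono : ∀ (n : Nat) (s : List (List Int)) (i : Nat), s.length ≤ n → i + 1 < s.length →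
    pvM2 (s.getD i []) (s.getD (i + 1) []) = true →
    pvLeftover s ≤ pvLeftover (pvRm s i) := by
  intro n
  induction n with
  | zero => intro s i h hi _; omega
  | succ n ih =>
    intro s i hlen hi hm
    match s with
    | [] => simp at hi
    | a :: t =>
      simp only [List.length_cons] at hlen hi
      match i with
      | 0 =>
        match t with
        | [] => simp at hi
        | c :: w =>
          have hrw : pvRm (a :: c :: w) 0 = w := by simp [pvRm]
          rw [hrw, pvLeftover_cons]
          have := pvFold_le_mem
            (fun k => pvM2 a ((c :: w).getD k []) && pvRemovable ((c :: w).take k))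
            (fun k => pvLeftover ((c :: w).drop (k + 1)))
            (List.range (c :: w).length) (1 + pvLeftover (c :: w)) 0
            (List.mem_range.2 (by simp)) ?_
          · simpa using this
          · simp only [List.getD_cons_zero, List.take_zero, pvRemovable_nil, Bool.and_true]
            simpa using hm
      | j + 1 =>
        have hj : j + 1 < t.length := by omega
        have hvlen : j + 2 ≤ t.length := by omega
        have hmv : pvM2 (t.getD j []) (t.getD (j + 1) []) = true := by
          simpa [List.getD_cons_succ] using hm
        have hEq : pvRm (a :: t) (j + 1) = a :: pvRm t j := by
          simp [pvRm, List.take_succ_cons]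
        rw [hEq]
        conv_rhs => rw [pvLeftover_cons]
        refine pvFold_ge _ _ _ _ _ ?_ ?_
        · have h1 := pvL_cons_le a t
          have h2 := ih t j (by omega) hj hmv
          omega
        · intro k' hk'mem hp
          show pvLeftover (a :: t) ≤ pvLeftover ((pvRm t j).drop (k' + 1))
          simp only [List.mem_range, pvRm_length t j hvlen] at hk'mem
          obtain ⟨hm', hr1'⟩ := Bool.and_eq_true_iff.1 hp
          by_cases hcase : k' < j
          · have hstep : pvLeftover (a :: t) ≤ pvLeftover (t.drop (k' + 1)) := by
              rw [pvLeftover_cons]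
              refine pvFold_le_mem _ _ _ _ k' (List.mem_range.2 (by omega)) ?_
              rw [pvRm_getD_lt t j k' hcase hvlen] at hm'
              rw [pvRm_take_le t j k' (le_of_lt hcase) hvlen] at hr1'
              show (pvM2 a (t.getD k' []) && pvRemovable (t.take k')) = true
              simp only [hm', hr1', Bool.and_self]
            rw [pvRm_drop_lt t j k' hcase hvlen]
            refine le_trans hstep (ih (t.drop (k' + 1)) (j - (k' + 1))
              (by simp only [List.length_drop]; omega) (by simp only [List.length_drop]; omega) ?_)
            rw [pvGetD_drop t (k' + 1) (j - (k' + 1)) (by omega),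
                pvGetD_drop t (k' + 1) (j - (k' + 1) + 1) (by omega),
                show k' + 1 + (j - (k' + 1)) = j from by omega,
                show k' + 1 + (j - (k' + 1) + 1) = j + 1 from by omega]
            exact hmv
          · rw [Nat.not_lt] at hcase
            have hgd : pvM2 a (t.getD (k' + 2) []) = true := by
              rwa [pvRm_getD_ge t j k' hcase (by omega)] at hm'
            have htk : pvRemovable (t.take (k' + 2)) = true := by
              rw [pvRm_take_ge t j k' hcase (by omega)] at hr1'
              refine pvRins (k' + 2) (t.take (k' + 2)) j (by simp only [List.length_take]; omega)
                (by simp only [List.length_take]; omega) ?_ hr1'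
              rw [pvGetD_take t (k' + 2) j (by omega) (by omega),
                  pvGetD_take t (k' + 2) (j + 1) (by omega) (by omega)]
              exact hmv
            have hstep : pvLeftover (a :: t) ≤ pvLeftover (t.drop (k' + 2 + 1)) := by
              rw [pvLeftover_cons]
              refine pvFold_le_mem _ _ _ _ (k' + 2) (List.mem_range.2 (by omega)) ?_
              show (pvM2 a (t.getD (k' + 2) []) && pvRemovable (t.take (k' + 2))) = true
              simp only [hgd, htk, Bool.and_self]
            rw [pvRm_drop_ge t j k' hcase hvlen]
            rwa [show k' + 2 + 1 = k' + 3 from by omega] at hstep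

theorem pvMainAux : ∀ (n : Nat) (s : List (List Int)), s.length ≤ n →
    pvBacktrack s = pvLeftover s := by
  intro n
  induction n with
  | zero =>
    intro s h
    have hs : s = [] := List.length_eq_zero_iff.1 (by omega)
    subst hs
    rw [pvB_nil, pvLeftover_nil]
  | succ n ih =>
    intro s hlen
    refine le_antisymm ?_ ?_
    · -- pvBacktrack s ≤ pvLeftover s
      match s with
      | [] => rw [pvB_nil, pvLeftover_nil]
      | a :: t =>
        simp only [List.length_cons] at hlen
        rw [pvLeftover_cons]
        refine pvFold_ge _ _ _ _ _ ?_ ?_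
        · rw [← ih t (by omega)]
          exact pvM1 t.length t a (le_refl _)
        · intro k hk hp
          show pvBacktrack (a :: t) ≤ pvLeftover (t.drop (k + 1))
          simp only [List.mem_range] at hk
          obtain ⟨hm, hrem⟩ := Bool.and_eq_true_iff.1 hp
          rw [← ih (t.drop (k + 1)) (by simp only [List.length_drop]; omega)]
          have e1 : a :: t = [a] ++ t.take k ++ (t.getD k [] :: t.drop (k + 1)) := by
            conv_lhs => rw [pvDecomp t k hk]
            simp
          have q := pvQ (t.take k).length (t.take k) [a] (t.getD k [] :: t.drop (k + 1))
            (le_refl _) hrem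
          rw [← e1] at q
          have e2 : [a] ++ (t.getD k [] :: t.drop (k + 1)) = [a, t.getD k []] ++ t.drop (k + 1) := by
            simp
          rw [e2] at q
          refine le_trans q ?_
          have hrm0 : pvRm ([a, t.getD k []] ++ t.drop (k + 1)) 0 = t.drop (k + 1) := by
            simp [pvRm]
          have hstep := pvB_step ([a, t.getD k []] ++ t.drop (k + 1)) 0
            (by simp only [List.length_append, List.length_cons]; omega) (by simpa using hm)
          rwa [hrm0] at hstep
    · -- pvLeftover s ≤ pvBacktrack s
      rw [pvBacktrack_eq]
      split_ifs with h0 h1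
      · subst h0; rw [pvLeftover_nil]
      · obtain ⟨a, rfl⟩ := List.length_eq_one_iff.1 h1
        rw [pvLeftover_cons]
        simp [pvLeftover_nil]
      · refine pvFold_ge _ _ _ _ _ (pvL_le_len s) ?_
        intro i hi hm
        show pvLeftover s ≤ pvBacktrack (pvRm s i)
        simp only [List.mem_range] at hi
        have h2 : s.length ≠ 0 := by simpa [List.length_eq_zero_iff] using h0
        rw [ih (pvRm s i) (by rw [pvRm_length s i (by omega)]; omega)]
        exact pvLmono s.length s i (le_refl _) (by omega) hm

theorem pvMain (s : List (List Int)) : pvBacktrack s = pvLeftover s :=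
  pvMainAux s.length s (le_refl _)

-- ===== VERDICT (by name: the statement is the Claim_ definition above) =====
theorem domino_pop_spec : Claim_equal_domino_pop := by
  intro dominoes _ _
  unfold Spec_domino_pop domino_pop domino_pop_alt
  exact pvMain dominoes
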